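-- pv_equiv track=rewrite | github.com/wltks98/Algorithm-Solving | python/kakao/kakao2018/1.py | solution
-- ===== SOURCE A (Python) =====
-- class Trie:
--     def __init__(self):
--         self.root = {}
--
--     def add(self, words):
--         cur = self.root
--
--         for ch in words:
--             if ch not in cur:
--                 cur[ch] = [0,{}]
--
--             cur[ch][0]+=1
--             cur = cur[ch][1]
--
--
--     def find(self,word):
--         cur=self.root
--         i=0
--         for ch in word:
--             i+=1
--             if cur[ch][0]==1:
--                 return i
--             cur=cur[ch][1]
--         return i
--
-- def solution(words):
--     answer = 0
--
--     trie=Trie()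
--
--     for word in words:
--         trie.add(word)
--     for word in words:
--         answer+=trie.find(word)
--     return answer
-- ===== SOURCE B (Python) =====
-- def _lcp(a, b):
--     k = 0
--     while k < len(a) and k < len(b) and a[k] == b[k]:
--         k += 1
--     return k
--
-- def solution(words):
--     total = 0
--     for i, w in enumerate(words):
--         best = 0
--         for j, u in enumerate(words):
--             if i != j:
--                 best = max(best, _lcp(w, u))
--         total += min(best + 1, len(w))
--     return total
-- ===== Notes on version B (the rewrite author's own statement) =====
-- stated objective: alternative
-- what changed: Replaces the trie build-and-walk with a direct pairwise computation: each word contributes min(1 + max LCP with any other word, its own length), summed.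
import Mathlib
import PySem

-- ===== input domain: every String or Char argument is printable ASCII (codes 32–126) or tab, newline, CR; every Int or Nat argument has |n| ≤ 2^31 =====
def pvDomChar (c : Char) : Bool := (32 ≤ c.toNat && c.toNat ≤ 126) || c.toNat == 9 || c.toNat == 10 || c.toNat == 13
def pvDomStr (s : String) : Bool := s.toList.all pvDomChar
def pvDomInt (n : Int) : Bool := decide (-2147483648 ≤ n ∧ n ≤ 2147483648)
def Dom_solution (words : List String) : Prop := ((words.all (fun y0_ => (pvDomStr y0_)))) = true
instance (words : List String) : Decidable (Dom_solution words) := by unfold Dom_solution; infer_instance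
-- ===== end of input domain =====

-- B replaces A's trie build-and-walk by a direct pairwise computation: each word
-- contributes min(1 + max LCP with any other word, its length); same values, no speed claim.

-- ===== PORT A =====
-- Python nested dicts {ch: [count, subdict]} become a mutual inductive trie
-- (an explicit child list, first-match lookup = dict lookup with unique keys).
mutual
inductive PTrie where
  | mk : PChildren → PTrie
inductive PChildren where
  | nil : PChildren
  | cons : Char → Int → PTrie → PChildren → PChildren
end

def PChildren.lookup : PChildren → Char → Option (Int × PTrie)
  | .nil, _ => none
  | .cons c n t rest, ch => if ch = c then some (n, t) else rest.lookup ch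

mutual
-- Trie.add: descend along the word; missing child appended (dict insertion order), count incremented.
def addT : PTrie → List Char → PTrie
  | t, [] => t
  | PTrie.mk cs, ch :: rest => PTrie.mk (addC cs ch rest)
  termination_by t w => (w.length, 0, 0)
def addC : PChildren → Char → List Char → PChildren
  | PChildren.nil, ch, rest => PChildren.cons ch 1 (addT (PTrie.mk PChildren.nil) rest) PChildren.nil
  | PChildren.cons c n t others, ch, rest =>
      if ch = c then PChildren.cons c (n + 1) (addT t rest) others
      else PChildren.cons c n t (addC others ch rest)
  termination_by cs ch rest => (rest.length, 1, sizeOf cs)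
end

-- Trie.find: i increments, return i at the first count==1 node, else len(word).
def findAux : PTrie → List Char → Int → Int
  | _, [], i => i
  | PTrie.mk cs, ch :: rest, i =>
      match cs.lookup ch with
      | none => i + 1   -- Python would raise KeyError; unreachable from `solution` (every word was added)
      | some (n, t) => if n = 1 then i + 1 else findAux t rest (i + 1)

def solution (words : List String) : Int :=
  let trie := words.foldl (fun t w => addT t w.toList) (PTrie.mk PChildren.nil)
  words.foldl (fun answer w => answer + findAux trie w.toList 0) 0

-- ===== PORT B =====
-- _lcp's while loop, transliterated structurally over the char lists.
def lcpChars : List Char → List Char → Int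
  | a :: as, b :: bs => if a = b then 1 + lcpChars as bs else 0
  | _, _ => 0

def solution_alt (words : List String) : Int :=
  (PySem.List.enumerate words).foldl (fun total iw =>
    let best := (PySem.List.enumerate words).foldl
      (fun best ju => if iw.1 ≠ ju.1 then max best (lcpChars iw.2.toList ju.2.toList) else best) 0
    total + min (best + 1) (PySem.Str.len iw.2)) 0

-- ===== PRECONDITION & SPEC =====
def Spec_solution (words : List String) (out : Int) : Prop := out = solution_alt words
instance (words : List String) (out : Int) : Decidable (Spec_solution words out) := by unfold Spec_solution; infer_instance

-- ===== CLAIM (what is proved, stated in full; the proofs are below) =====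
def Claim_equal_solution : Prop := ∀ (words : List String), Dom_solution words → Spec_solution words (solution words)

-- ===== LEMMAS AND PROOFS =====

-- Nat-valued LCP, and the bridge to the Int port
def lcpN : List Char → List Char → Nat
  | a :: as, b :: bs => if a = b then lcpN as bs + 1 else 0
  | _, _ => 0

theorem lcpChars_eq_lcpN (a b : List Char) : lcpChars a b = ((lcpN a b : Nat) : Int) := by
  induction a generalizing b with
  | nil => cases b <;> simp [lcpChars, lcpN]
  | cons x as ih =>
    cases b with
    | nil => simp [lcpChars, lcpN]
    | cons y bs =>
      by_cases h : x = y <;> simp [lcpChars, lcpN, h, ih] <;> omega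

theorem lcpN_self (cs : List Char) : lcpN cs cs = cs.length := by
  induction cs with
  | nil => simp [lcpN]
  | cons c cs ih => simp [lcpN, ih]

-- number of words having p as a prefix
def cntN (p : List Char) (ws : List String) : Nat := ws.countP (fun u => p.isPrefixOf u.toList)

def natOpt (n : Nat) : Option Int := if n = 0 then none else some (n : Int)

theorem natOpt_getD (n : Nat) : (natOpt n).getD 0 = (n : Int) := by
  unfold natOpt; split <;> simp_all

theorem natOpt_succ (n : Nat) : natOpt (n + 1) = some ((n : Int) + 1) := by
  unfold natOpt; simp

-- the count stored at the node reached from t along p (none if the path is missing)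
def countAt : PTrie → List Char → Option Int
  | _, [] => none
  | PTrie.mk cs, ch :: rest =>
      match cs.lookup ch with
      | none => none
      | some (n, t) => if rest = [] then some n else countAt t rest

theorem countAt_empty (q : List Char) (hq : q ≠ []) : countAt (PTrie.mk PChildren.nil) q = none := by
  cases q with
  | nil => exact absurd rfl hq
  | cons c r => simp [countAt, PChildren.lookup]

theorem lookup_addC (cs : PChildren) (c : Char) (w : List Char) (ch : Char) :
    (addC cs c w).lookup ch =
      if ch = c then
        match cs.lookup c with
        | none => some (1, addT (PTrie.mk PChildren.nil) w)
        | some (n, t) => some (n + 1, addT t w)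
      else cs.lookup ch := by
  match cs with
  | PChildren.nil =>
    by_cases h : ch = c <;> simp [addC, PChildren.lookup, h]
  | PChildren.cons c' n t others =>
    by_cases h1 : c = c'
    · subst h1
      by_cases h2 : ch = c <;> simp [addC, PChildren.lookup, h2]
    · have hrec := lookup_addC others c w ch
      by_cases h2 : ch = c' <;> by_cases h3 : ch = c <;>
        simp_all [addC, PChildren.lookup, Ne.symm h1]

theorem countAt_addT (p : List Char) (t : PTrie) (w : List Char) (hp : p ≠ []) :
    countAt (addT t w) p =
      if p.isPrefixOf w then some ((countAt t p).getD 0 + 1) else countAt t p := by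
  match p with
  | [] => exact absurd rfl hp
  | ch :: rest =>
    cases w with
    | nil => simp [addT, List.isPrefixOf]
    | cons c cs' =>
      obtain ⟨csC⟩ := t
      by_cases hch : ch = c
      · subst hch
        have hlk := lookup_addC csC ch cs' ch
        rw [if_pos rfl] at hlk
        have hpref : (ch :: rest).isPrefixOf (ch :: cs') = rest.isPrefixOf cs' := by
          simp [List.isPrefixOf]
        cases hl : csC.lookup ch with
        | none =>
          rw [hl] at hlk
          by_cases hrest : rest = []
          · subst hrest
            simp [countAt, addT, hlk, hl, List.isPrefixOf]
          · have hrec := countAt_addT rest (PTrie.mk PChildren.nil) cs' hrest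
            rw [countAt_empty rest hrest] at hrec
            simp only [addT, countAt, hlk, hl, if_neg hrest, hpref, hrec]
        | some nt =>
          obtain ⟨n0, t0⟩ := nt
          rw [hl] at hlk
          by_cases hrest : rest = []
          · subst hrest
            simp [countAt, addT, hlk, hl, List.isPrefixOf]
          · have hrec := countAt_addT rest t0 cs' hrest
            simp only [addT, countAt, hlk, hl, if_neg hrest, hpref, hrec]
      · have hpf : (ch :: rest).isPrefixOf (c :: cs') = false := by
          simp [List.isPrefixOf, hch]
        simp [addT, countAt, lookup_addC, hch, hpf]

theorem countAt_foldl (ws : List String) (t : PTrie) (f : List Char → Nat)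
    (h : ∀ p, p ≠ [] → countAt t p = natOpt (f p)) :
    ∀ p, p ≠ [] → countAt (ws.foldl (fun t w => addT t w.toList) t) p = natOpt (f p + cntN p ws) := by
  induction ws generalizing t f with
  | nil => intro p hp; simpa [cntN] using h p hp
  | cons w ws ih =>
    intro p hp
    have hstep : ∀ q, q ≠ [] → countAt (addT t w.toList) q =
        natOpt (f q + if q.isPrefixOf w.toList then 1 else 0) := by
      intro q hq
      rw [countAt_addT q t w.toList hq, h q hq]
      by_cases hpre : q.isPrefixOf w.toList
      · simp [hpre, natOpt_getD, natOpt_succ]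
      · simp [hpre]
    have := ih (addT t w.toList) _ hstep p hp
    rw [List.foldl_cons, this]
    have : f p + (if p.isPrefixOf w.toList then 1 else 0) + cntN p ws = f p + cntN p (w :: ws) := by
      simp [cntN, List.countP_cons]
      omega
    rw [this]

theorem countAt_build (ws : List String) (p : List Char) (hp : p ≠ []) :
    countAt (ws.foldl (fun t w => addT t w.toList) (PTrie.mk PChildren.nil)) p = natOpt (cntN p ws) := by
  have := countAt_foldl ws (PTrie.mk PChildren.nil) (fun _ => 0)
    (fun q hq => by rw [countAt_empty q hq]; simp [natOpt]) p hp
  simpa using this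

-- pure recurrence equal to findAux on the built trie
def findSpec (ws : List String) : List Char → List Char → Int → Int
  | _, [], i => i
  | pre, ch :: rest, i =>
      if cntN (pre ++ [ch]) ws = 1 then i + 1 else findSpec ws (pre ++ [ch]) rest (i + 1)

theorem findAux_eq_findSpec (ws : List String) (cs pre : List Char) (t : PTrie) (i : Int)
    (hinv : ∀ q, q ≠ [] → countAt t q = natOpt (cntN (pre ++ q) ws))
    (hex : ∃ u ∈ ws, (pre ++ cs).isPrefixOf u.toList) :
    findAux t cs i = findSpec ws pre cs i := by
  match cs with
  | [] => simp [findAux, findSpec]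
  | ch :: rest =>
    obtain ⟨csX⟩ := t
    obtain ⟨u, hu, hupre⟩ := hex
    have hpre1 : (pre ++ [ch]).isPrefixOf u.toList := by
      rw [List.isPrefixOf_iff_prefix] at hupre ⊢
      refine List.IsPrefix.trans ?_ hupre
      simpa using List.prefix_append_right ..
    have hm : cntN (pre ++ [ch]) ws ≠ 0 := by
      have : 0 < cntN (pre ++ [ch]) ws := by
        unfold cntN
        rw [List.countP_pos_iff]
        exact ⟨u, hu, by simpa using hpre1⟩
      omega
    have h1 := hinv [ch] (by simp)
    rw [show natOpt (cntN (pre ++ [ch]) ws) = some ((cntN (pre ++ [ch]) ws : Nat) : Int) by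
      unfold natOpt; simp [hm]] at h1
    cases hl : csX.lookup ch with
    | none => simp [countAt, hl] at h1
    | some nt =>
      obtain ⟨n, t'⟩ := nt
      simp only [countAt, hl, if_pos rfl] at h1
      have hn : n = ((cntN (pre ++ [ch]) ws : Nat) : Int) := by
        simpa using h1
      by_cases hone : cntN (pre ++ [ch]) ws = 1
      · have : n = 1 := by rw [hn, hone]; simp
        simp [findAux, findSpec, hl, this, hone]
      · have hne : ¬ n = 1 := by
          rw [hn]; intro hc; apply hone; exact_mod_cast hc
        have hinv' : ∀ q, q ≠ [] → countAt t' q = natOpt (cntN ((pre ++ [ch]) ++ q) ws) := by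
          intro q hq
          have hq2 := hinv (ch :: q) (by simp)
          simp only [countAt, hl, if_neg hq] at hq2
          rw [show pre ++ [ch] ++ q = pre ++ ch :: q from by simp]
          exact hq2
        have hex' : ∃ u ∈ ws, ((pre ++ [ch]) ++ rest).isPrefixOf u.toList :=
          ⟨u, hu, by simpa using hupre⟩
        have hrec := findAux_eq_findSpec ws rest (pre ++ [ch]) t' (i + 1) hinv' hex'
        simp [findAux, findSpec, hl, hne, hone, hrec]

theorem take_prefix_iff (k : Nat) (cs us : List Char) (hk : k ≤ cs.length) :
    (cs.take k).isPrefixOf us = true ↔ k ≤ lcpN cs us := by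
  induction cs generalizing k us with
  | nil =>
    have : k = 0 := by simpa using hk
    subst this; simp [List.isPrefixOf, lcpN]
  | cons c cs' ih =>
    cases k with
    | zero => simp [List.isPrefixOf]
    | succ k' =>
      cases us with
      | nil => simp [List.isPrefixOf, lcpN]
      | cons u us' =>
        by_cases h : c = u
        · subst h
          have hk' : k' ≤ cs'.length := by simpa using hk
          rw [show lcpN (c :: cs') (c :: us') = lcpN cs' us' + 1 from by simp [lcpN]]
          rw [show ((c :: cs').take (k' + 1)).isPrefixOf (c :: us') = (cs'.take k').isPrefixOf us'
            from by simp [List.isPrefixOf]]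
          rw [ih k' us' hk']
          omega
        · simp [List.isPrefixOf, lcpN, h]

theorem foldl_max_lt_iff {α : Type} (l : List α) (f : α → Nat) (a k : Nat) :
    l.foldl (fun b x => max b (f x)) a < k ↔ a < k ∧ ∀ x ∈ l, f x < k := by
  induction l generalizing a with
  | nil => simp
  | cons x xs ih =>
    rw [List.foldl_cons, ih]
    simp [Nat.max_lt]
    tauto

theorem take_append_cons (pre : List Char) (ch : Char) (rest : List Char) :
    (pre ++ ch :: rest).take (pre.length + 1) = pre ++ [ch] := by
  have : pre ++ ch :: rest = (pre ++ [ch]) ++ rest := by simp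
  rw [this]
  have hlen : pre.length + 1 = (pre ++ [ch]).length := by simp
  rw [hlen, List.take_left]

theorem findSpec_min (ws : List String) (rest pre : List Char) (bestN : Nat)
    (hb : pre.length ≤ bestN)
    (hiff : ∀ k, pre.length < k → k ≤ pre.length + rest.length →
        (cntN ((pre ++ rest).take k) ws = 1 ↔ bestN < k)) :
    findSpec ws pre rest ((pre.length : Nat) : Int) =
      min (((bestN : Nat) : Int) + 1) (((pre.length + rest.length : Nat) : Int)) := by
  induction rest generalizing pre with
  | nil =>
    simp [findSpec]
    omega
  | cons ch rest' ih =>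
    have htake : (pre ++ ch :: rest').take (pre.length + 1) = pre ++ [ch] :=
      take_append_cons pre ch rest'
    have hk1 := hiff (pre.length + 1) (by omega) (by simp)
    rw [htake] at hk1
    by_cases hone : cntN (pre ++ [ch]) ws = 1
    · have hlt : bestN < pre.length + 1 := hk1.mp hone
      simp only [findSpec, List.length_cons]
      rw [if_pos hone]
      push_cast
      omega
    · have hge : pre.length + 1 ≤ bestN := by
        rcases Nat.lt_or_ge bestN (pre.length + 1) with h | h
        · exact absurd (hk1.mpr h) hone
        · exact h
      have hiff' : ∀ k, (pre ++ [ch]).length < k → k ≤ (pre ++ [ch]).length + rest'.length →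
          (cntN (((pre ++ [ch]) ++ rest').take k) ws = 1 ↔ bestN < k) := by
        intro k h1 h2
        rw [show (pre ++ [ch]) ++ rest' = pre ++ ch :: rest' from by simp]
        exact hiff k (by simp at h1; omega) (by simp at h2 ⊢; omega)
      have hrec := ih (pre ++ [ch]) (by simp; omega) hiff'
      have hlen : (pre ++ [ch]).length = pre.length + 1 := by simp
      rw [hlen] at hrec
      simp only [findSpec, List.length_cons]
      rw [if_neg hone]
      rw [show ((pre.length : Nat) : Int) + 1 = ((pre.length + 1 : Nat) : Int) from by push_cast; ring]
      rw [hrec]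
      push_cast
      omega

theorem foldl_max_snd {α : Type} (l : List α) (s : Int) (g : α → Int) (a : Int) :
    (PySem.List.enumerate l s).foldl (fun b ju => max b (g ju.2)) a
      = l.foldl (fun b u => max b (g u)) a := by
  conv_rhs => rw [← PySem.List.map_snd_enumerate l s]
  rw [List.foldl_map]

theorem foldl_max_cast {α : Type} (l : List α) (f : α → Nat) (a : Nat) :
    l.foldl (fun b u => max b ((f u : Nat) : Int)) ((a : Nat) : Int)
      = ((l.foldl (fun b u => max b (f u)) a : Nat) : Int) := by
  induction l generalizing a with
  | nil => rfl
  | cons x xs ih =>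
    rw [List.foldl_cons, List.foldl_cons,
      show max ((a : Nat) : Int) ((f x : Nat) : Int) = ((max a (f x) : Nat) : Int) from by
        simp [Nat.cast_max]]
    exact ih (max a (f x))

theorem enum_fold_max (l : List String) (k : Nat) (hk : k < l.length) (f : String → Nat) :
    (PySem.List.enumerate l 0).foldl
        (fun b ju => if ((k : Nat) : Int) ≠ ju.1 then max b ((f ju.2 : Nat) : Int) else b) 0
      = (((l.take k ++ l.drop (k + 1)).foldl (fun b u => max b (f u)) 0 : Nat) : Int) := by
  have hsplit : l = l.take k ++ l[k] :: l.drop (k + 1) := by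
    conv_lhs => rw [← List.take_append_drop k l]
    rw [List.drop_eq_getElem_cons hk]
  have hlen : (l.take k).length = k := by
    simp [List.length_take]
    omega
  have h1 : ∀ (b : Int), ∀ ju ∈ PySem.List.enumerate (l.take k) 0,
      (if ((k : Nat) : Int) ≠ ju.1 then max b ((f ju.2 : Nat) : Int) else b)
        = max b ((f ju.2 : Nat) : Int) := by
    intro b ju hju
    obtain ⟨j, hj, rfl⟩ := (PySem.List.mem_enumerate_iff _ _ _).mp hju
    have hjk : j < k := by rw [hlen] at hj; exact hj
    have hne : ((k : Nat) : Int) ≠ (0 : Int) + (j : Nat) := by push_cast; omega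
    simp only []
    rw [if_pos hne]
  have h2 : ∀ (b : Int), ∀ ju ∈ PySem.List.enumerate (l.drop (k + 1)) (0 + ((l.take k).length : Nat) + 1),
      (if ((k : Nat) : Int) ≠ ju.1 then max b ((f ju.2 : Nat) : Int) else b)
        = max b ((f ju.2 : Nat) : Int) := by
    intro b ju hju
    obtain ⟨j, hj, rfl⟩ := (PySem.List.mem_enumerate_iff _ _ _).mp hju
    have hne : ((k : Nat) : Int) ≠ (0 : Int) + ((l.take k).length : Nat) + 1 + (j : Nat) := by
      rw [hlen]; push_cast; omega
    simp only []
    rw [if_pos hne]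
  conv_lhs => rw [hsplit]
  rw [PySem.List.enumerate_append, List.foldl_append, PySem.List.enumerate_cons, List.foldl_cons]
  rw [PySem.List.foldl_congr_mem _ _ _ 0 h1]
  rw [show (if ((k : Nat) : Int) ≠ ((0 : Int) + ((l.take k).length : Nat), l[k]).1 then
        max ((PySem.List.enumerate (l.take k) 0).foldl (fun b ju => max b ((f ju.2 : Nat) : Int)) 0)
          ((f (((0 : Int) + ((l.take k).length : Nat), l[k])).2 : Nat) : Int)
      else (PySem.List.enumerate (l.take k) 0).foldl (fun b ju => max b ((f ju.2 : Nat) : Int)) 0)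
      = (PySem.List.enumerate (l.take k) 0).foldl (fun b ju => max b ((f ju.2 : Nat) : Int)) 0 from by
    rw [if_neg]
    rw [hlen]
    push_cast
    omega]
  rw [PySem.List.foldl_congr_mem _ _ _ _ h2]
  rw [foldl_max_snd (l.drop (k + 1)) (0 + ((l.take k).length : Nat) + 1)
    (fun u => ((f u : Nat) : Int))]
  rw [foldl_max_snd (l.take k) 0 (fun u => ((f u : Nat) : Int))]
  rw [show (0 : Int) = ((0 : Nat) : Int) from by simp]
  rw [foldl_max_cast (l.take k) f 0]
  rw [foldl_max_cast (l.drop (k + 1)) f]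
  rw [List.foldl_append]

theorem cnt_one_iff (l1 l2 : List String) (w : String) (p : List Char)
    (hp : p.isPrefixOf w.toList = true) :
    cntN p (l1 ++ w :: l2) = 1 ↔ ∀ u ∈ l1 ++ l2, ¬ p.isPrefixOf u.toList = true := by
  unfold cntN
  rw [List.countP_append, List.countP_cons]
  simp only [hp, if_true]
  constructor
  · intro h u hu
    have h1 : l1.countP (fun u => p.isPrefixOf u.toList) = 0 := by omega
    have h2 : l2.countP (fun u => p.isPrefixOf u.toList) = 0 := by omega
    rcases List.mem_append.mp hu with h3 | h3
    · exact List.countP_eq_zero.mp h1 u h3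
    · exact List.countP_eq_zero.mp h2 u h3
  · intro h
    have h1 : l1.countP (fun u => p.isPrefixOf u.toList) = 0 :=
      List.countP_eq_zero.mpr (fun u hu => h u (List.mem_append_left _ hu))
    have h2 : l2.countP (fun u => p.isPrefixOf u.toList) = 0 :=
      List.countP_eq_zero.mpr (fun u hu => h u (List.mem_append_right _ hu))
    omega

theorem per_word (words : List String) (k : Nat) (hk : k < words.length) :
    findAux (words.foldl (fun t w => addT t w.toList) (PTrie.mk PChildren.nil)) words[k].toList 0
      = min ((((words.take k ++ words.drop (k + 1)).foldl
              (fun b u => max b (lcpN words[k].toList u.toList)) 0 : Nat) : Int) + 1)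
            ((words[k].toList.length : Nat) : Int) := by
  have hA : findAux (words.foldl (fun t w => addT t w.toList) (PTrie.mk PChildren.nil))
      words[k].toList 0 = findSpec words [] words[k].toList 0 := by
    apply findAux_eq_findSpec
    · intro q hq
      rw [countAt_build words q hq]
      simp
    · exact ⟨words[k], List.getElem_mem hk, by
        simpa using List.isPrefixOf_iff_prefix.mpr (List.prefix_refl _)⟩
  have hsplit : words = words.take k ++ words[k] :: words.drop (k + 1) := by
    conv_lhs => rw [← List.take_append_drop k words]
    rw [List.drop_eq_getElem_cons hk]
  have hiff : ∀ kk, ([] : List Char).length < kk → kk ≤ ([] : List Char).length + words[k].toList.length →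
      (cntN (([] ++ words[k].toList).take kk) words = 1 ↔
        (words.take k ++ words.drop (k + 1)).foldl
          (fun b u => max b (lcpN words[k].toList u.toList)) 0 < kk) := by
    intro kk h0 hkk
    simp only [List.length_nil] at h0 hkk
    have hkk' : kk ≤ words[k].toList.length := by omega
    have hp : (words[k].toList.take kk).isPrefixOf words[k].toList = true := by
      rw [take_prefix_iff kk _ _ hkk', lcpN_self]
      exact hkk'
    rw [List.nil_append]
    rw [show cntN (words[k].toList.take kk) words
        = cntN (words[k].toList.take kk) (words.take k ++ words[k] :: words.drop (k + 1)) from by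
      rw [← hsplit]]
    rw [cnt_one_iff _ _ _ _ hp]
    constructor
    · intro h1
      refine (foldl_max_lt_iff (words.take k ++ words.drop (k + 1))
        (fun u => lcpN words[k].toList u.toList) 0 kk).mpr ⟨h0, ?_⟩
      intro u hu
      have h2 := h1 u hu
      rcases Nat.lt_or_ge (lcpN words[k].toList u.toList) kk with h3 | h3
      · exact h3
      · exact absurd ((take_prefix_iff kk _ _ hkk').mpr h3) h2
    · intro h1 u hu
      have h2 := ((foldl_max_lt_iff (words.take k ++ words.drop (k + 1))
        (fun u => lcpN words[k].toList u.toList) 0 kk).mp h1).2 u hu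
      intro hc
      have := (take_prefix_iff kk _ _ hkk').mp hc
      omega
  have hB := findSpec_min words words[k].toList []
    ((words.take k ++ words.drop (k + 1)).foldl
      (fun b u => max b (lcpN words[k].toList u.toList)) 0)
    (by simp) hiff
  simp only [List.length_nil, Nat.cast_zero, Nat.zero_add] at hB
  rw [hA, hB]

theorem sum_align {α : Type} (ws : List α) (gA : α → Int) (gB : Int × α → Int)
    (h : ∀ p ∈ PySem.List.enumerate ws 0, gB p = gA p.2) :
    ((PySem.List.enumerate ws 0).map gB).sum = (ws.map gA).sum := by
  rw [List.map_congr_left h]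
  rw [show (fun p : Int × α => gA p.2) = gA ∘ (fun p : Int × α => p.2) from rfl]
  rw [← List.map_map, PySem.List.map_snd_enumerate]

-- ===== VERDICT (by name: the statement is the Claim_ definition above) =====
theorem solution_spec : Claim_equal_solution := by
  intro words _
  show solution words = solution_alt words
  simp only [solution, solution_alt]
  rw [PySem.List.foldl_add words
    (fun w => findAux (words.foldl (fun t w => addT t w.toList) (PTrie.mk PChildren.nil)) w.toList 0) 0]
  rw [PySem.List.foldl_add (PySem.List.enumerate words)
    (fun iw => min ((PySem.List.enumerate words).foldl
      (fun best ju => if iw.1 ≠ ju.1 then max best (lcpChars iw.2.toList ju.2.toList) else best) 0 + 1)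
      (PySem.Str.len iw.2)) 0]
  simp only [zero_add]
  refine (sum_align words _ _ ?_).symm
  intro p hp
  obtain ⟨k, hk, rfl⟩ := (PySem.List.mem_enumerate_iff _ _ _).mp hp
  simp only [zero_add]
  have hfun : ∀ (b : Int), ∀ ju ∈ PySem.List.enumerate words 0,
      (if ((k : Nat) : Int) ≠ ju.1 then max b (lcpChars words[k].toList ju.2.toList) else b)
        = (if ((k : Nat) : Int) ≠ ju.1 then max b ((lcpN words[k].toList ju.2.toList : Nat) : Int) else b) := by
    intro b ju _
    rw [lcpChars_eq_lcpN]
  rw [PySem.List.foldl_congr_mem _ _ _ 0 hfun]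
  rw [enum_fold_max words k hk (fun u => lcpN words[k].toList u.toList)]
  rw [per_word words k hk]
  rw [PySem.Str.len_eq]
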